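-- pv_equiv track=rewrite | github.com/bijay-ps/Algorithimic_Problems-Solutions | migratoryBird.py | migratoryBird
-- ===== SOURCE A (Python) =====
-- def migratoryBird(arr):
--     arr_dict = {}
--     for item in arr:
--         arr_dict.update({item: arr.count(item)})
--     max_val = max(arr_dict.values())
--     keys = []
--     for key, val in arr_dict.items():
--         if max_val == val:
--             keys.append(key)
--     return min(keys)
-- ===== SOURCE B (Python) =====
-- def migratoryBird(arr):
--     counts = {}
--     for x in arr:
--         counts[x] = counts.get(x, 0) + 1
--     best = None
--     for k, c in counts.items():
--         if best is None or c > best[1] or (c == best[1] and k < best[0]):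
--             best = (k, c)
--     return best[0]
-- ===== Notes on version B (the rewrite author's own statement) =====
-- stated objective: faster
-- what changed: A rebuilds the frequency of every element with a full arr.count scan inside the loop and then takes max over values followed by a filtered min over keys; B builds the counts in one pass with a dictionary (counts.get(x,0)+1) and selects the answer in a single pass over the items, keeping the pair with strictly greater count or equal count and smaller key.
import Mathlib
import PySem

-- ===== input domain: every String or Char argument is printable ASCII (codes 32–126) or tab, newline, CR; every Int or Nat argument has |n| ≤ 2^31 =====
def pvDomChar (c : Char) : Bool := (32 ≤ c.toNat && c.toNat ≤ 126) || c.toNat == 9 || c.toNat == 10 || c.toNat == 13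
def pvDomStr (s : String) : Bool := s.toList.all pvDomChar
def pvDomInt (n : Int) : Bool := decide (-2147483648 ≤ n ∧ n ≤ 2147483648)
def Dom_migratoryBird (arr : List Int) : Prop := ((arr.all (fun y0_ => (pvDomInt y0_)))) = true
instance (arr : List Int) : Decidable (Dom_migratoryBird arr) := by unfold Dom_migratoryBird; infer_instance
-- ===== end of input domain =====

-- B replaces A's quadratic arr.count-in-a-loop counting by a one-pass counter dict and
-- picks the (smallest-key, maximal-count) pair in a single pass over the items (objective: faster).

-- ===== PORT A =====
-- A: dict built by inserting item ↦ arr.count(item); then max over values,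
-- collect keys with that value, return min of them.  max()/min() raise ValueError
-- on empty input; those inputs are excluded by Pre_ and the `none` branches return 0 there.
def migratoryBird (arr : List Int) : Int :=
  let d := arr.foldl (fun d item => d.insert item ((arr.count item : Int))) PySem.Dict.empty
  match PySem.List.max? d.values (fun v => v) with
  | none => 0
  | some maxVal =>
    let keys := d.items.foldl (fun ks p => if maxVal == p.2 then ks ++ [p.1] else ks) ([] : List Int)
    match PySem.List.min? keys (fun k => k) with
    | none => 0
    | some m => m

-- ===== PORT B =====
-- one step of B's selection loop: keep the pair with strictly greater count,
-- or equal count and smaller key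
def pvStep (b : Option (Int × Int)) (p : Int × Int) : Option (Int × Int) :=
  match b with
  | none => some p
  | some b => if b.2 < p.2 || (p.2 == b.2 && p.1 < b.1) then some p else some b

-- B: counts[x] = counts.get(x, 0) + 1 in one pass, then one pass over items keeping the best
-- pair.  On empty input Python B raises (best[0] with best = None); excluded by Pre_, 0 there.
def migratoryBird_alt (arr : List Int) : Int :=
  let counts := arr.foldl (fun d x => d.modify x 0 (· + 1)) PySem.Dict.empty
  match counts.items.foldl pvStep none with
  | some b => b.1
  | none => 0

-- ===== PRECONDITION & SPEC =====
-- Pre_ excludes exactly the empty list, on which A raises ValueError (max of an empty iterable).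
def Pre_migratoryBird (arr : List Int) : Prop := arr ≠ []
instance (arr : List Int) : Decidable (Pre_migratoryBird arr) := by unfold Pre_migratoryBird; infer_instance
def pvWitness_migratoryBird : List Int := [1]

def Spec_migratoryBird (arr : List Int) (out : Int) : Prop := out = migratoryBird_alt arr
instance (arr : List Int) (out : Int) : Decidable (Spec_migratoryBird arr out) := by unfold Spec_migratoryBird; infer_instance

-- ===== CLAIM (what is proved, stated in full; the proofs are below) =====
def Claim_equal_migratoryBird : Prop := ∀ (arr : List Int), Dom_migratoryBird arr → Pre_migratoryBird arr → Spec_migratoryBird arr (migratoryBird arr)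

-- ===== LEMMAS AND PROOFS =====

-- a fold of inserts with a value depending only on the key: final lookup
theorem pv_getD_foldl_insert_fn (l : List Int) (f : Int → Int) (d : PySem.Dict Int Int) (k : Int) :
    (l.foldl (fun d x => d.insert x (f x)) d).getD k 0 = if k ∈ l then f k else d.getD k 0 := by
  induction l generalizing d with
  | nil => simp
  | cons x t ih =>
    simp only [List.foldl_cons, ih, PySem.Dict.getD_insert, List.mem_cons]
    by_cases hk : k ∈ t <;> by_cases hx : k = x <;> simp [hk, hx]

-- A's dict equals collections.Counter(arr)
theorem pv_dictA_eq_counter (arr : List Int) :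
    arr.foldl (fun d item => d.insert item ((arr.count item : Int))) PySem.Dict.empty
      = PySem.Dict.counter arr := by
  apply PySem.Dict.ext
  rw [PySem.Dict.items_counter]
  rw [PySem.Dict.items_eq_map_keys _
      (PySem.Dict.nodup_keys_foldl_insert arr (fun _ item => (arr.count item : Int)) _
        PySem.Dict.nodup_keys_empty) 0]
  rw [PySem.Dict.keys_foldl_insert,
      show (PySem.Dict.empty : PySem.Dict Int Int).keys = [] from rfl,
      PySem.Set.update_nil_left]
  apply List.map_congr_left
  intro k hk
  have hk' : k ∈ arr := (PySem.Set.mem_ofList _ _).1 hk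
  rw [pv_getD_foldl_insert_fn]
  simp [hk']

-- the B-fold's result is a member, has maximal count, and minimal key among ties
def pvBest (l : List (Int × Int)) (b : Int × Int) : Prop :=
  b ∈ l ∧ (∀ p ∈ l, p.2 ≤ b.2) ∧ (∀ p ∈ l, p.2 = b.2 → b.1 ≤ p.1)

theorem pv_step_spec (b0 p : Int × Int) :
    ∃ b1, pvStep (some b0) p = some b1 ∧ (b1 = b0 ∨ b1 = p) ∧ b0.2 ≤ b1.2 ∧ p.2 ≤ b1.2 ∧
      (b0.2 = b1.2 → b1.1 ≤ b0.1) ∧ (p.2 = b1.2 → b1.1 ≤ p.1) := by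
  have hred : pvStep (some b0) p
      = if (b0.2 < p.2 || (p.2 == b0.2 && p.1 < b0.1)) then some p else some b0 := rfl
  rw [hred]
  by_cases h : (b0.2 < p.2 || (p.2 == b0.2 && p.1 < b0.1)) = true
  · have h' := h
    simp only [Bool.or_eq_true, Bool.and_eq_true, decide_eq_true_eq, beq_iff_eq] at h'
    exact ⟨p, by rw [if_pos h], Or.inr rfl, by omega, le_refl _, by omega, fun _ => le_refl _⟩
  · have h' := h
    simp only [Bool.or_eq_true, Bool.and_eq_true, decide_eq_true_eq, beq_iff_eq, not_or,
      not_and, not_lt] at h'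
    exact ⟨b0, by rw [if_neg h], Or.inl rfl, le_refl _, by omega, fun _ => le_refl _, by omega⟩

theorem pv_fold_best (l : List (Int × Int)) (b0 : Int × Int) :
    ∃ b, l.foldl pvStep (some b0) = some b ∧ pvBest (b0 :: l) b := by
  induction l generalizing b0 with
  | nil => exact ⟨b0, rfl, List.mem_cons_self, by simp, by simp⟩
  | cons p t ih =>
    obtain ⟨b1, hstep, hmem1, hb0le, hple, hb0min, hpmin⟩ := pv_step_spec b0 p
    obtain ⟨b, hfold, hbmem, hbmax, hbmin⟩ := ih b1
    have hb1le : b1.2 ≤ b.2 := hbmax b1 List.mem_cons_self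
    have hb1min : b1.2 = b.2 → b.1 ≤ b1.1 := hbmin b1 List.mem_cons_self
    refine ⟨b, by simpa [hstep] using hfold, ?_, ?_, ?_⟩
    · simp only [List.mem_cons] at hbmem ⊢
      rcases hbmem with rfl | h
      · rcases hmem1 with rfl | rfl
        · exact Or.inl rfl
        · exact Or.inr (Or.inl rfl)
      · exact Or.inr (Or.inr h)
    · intro q hq
      simp only [List.mem_cons] at hq
      rcases hq with rfl | rfl | hq
      · omega
      · omega
      · exact hbmax q (List.mem_cons_of_mem _ hq)
    · intro q hq hq2
      simp only [List.mem_cons] at hq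
      rcases hq with rfl | rfl | hq
      · have h2 : b1.2 = b.2 := by omega
        have := hb1min h2
        have := hb0min (by omega)
        omega
      · have h2 : b1.2 = b.2 := by omega
        have := hb1min h2
        have := hpmin (by omega)
        omega
      · exact hbmin q (List.mem_cons_of_mem _ hq) hq2

-- ===== VERDICT (by name: the statement is the Claim_ definition above) =====
theorem migratoryBird_spec : Claim_equal_migratoryBird := by
  intro arr _ hpre
  unfold Spec_migratoryBird
  simp only [migratoryBird, migratoryBird_alt]
  rw [pv_dictA_eq_counter]
  have hcnt : arr.foldl (fun d x => d.modify x 0 (· + 1)) PySem.Dict.empty = PySem.Dict.counter arr := by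
    rw [PySem.Dict.counter_eq_foldl]
  rw [hcnt]
  set l := (PySem.Dict.counter arr).items with hl
  -- l is nonempty
  have hlne : l ≠ [] := by
    rw [hl, PySem.Dict.items_counter]
    cases arr with
    | nil => exact absurd rfl hpre
    | cons a t =>
      intro h
      have ha : a ∈ PySem.Set.ofList (a :: t) := (PySem.Set.mem_ofList _ _).2 (by simp)
      rw [List.map_eq_nil_iff.1 h] at ha
      cases ha
  -- B side: the fold gives a best element
  obtain ⟨p0, t0, hlcons⟩ := List.exists_cons_of_ne_nil hlne
  obtain ⟨b, hfold, hbmem, hbmax, hbmin⟩ := pv_fold_best t0 p0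
  have hfold' : l.foldl pvStep none = some b := by rw [hlcons]; simpa [pvStep] using hfold
  rw [hfold']
  -- A side: values = items.map snd
  have hvals : (PySem.Dict.counter arr).values = l.map (fun p => p.2) := by
    simp [PySem.Dict.values, hl]
  rw [hvals]
  -- the max exists
  obtain ⟨M, hM⟩ : ∃ M, PySem.List.max? (l.map (fun p => p.2)) (fun v => v) = some M := by
    cases h : PySem.List.max? (l.map (fun p => p.2)) (fun v => v) with
    | none =>
      rw [PySem.List.max?_eq_none_iff] at h
      exact absurd (List.map_eq_nil_iff.1 h) hlne
    | some M => exact ⟨M, rfl⟩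
  rw [hM]
  -- b has the maximal count M
  have hbM : b.2 = M := by
    have hble : b.2 ≤ M := by
      have := PySem.List.max?_isMax hM b.2 (List.mem_map_of_mem (hlcons ▸ hbmem))
      simpa using this
    have hMmem := PySem.List.max?_mem hM
    obtain ⟨q, hq, hq2⟩ := List.mem_map.1 hMmem
    have := hbmax q (hlcons ▸ hq)
    omega
  -- reduce both matches (scrutinees are literals now), then the collected keys
  show (match PySem.List.min?
        (l.foldl (fun ks p => if (M == p.2) = true then ks ++ [p.1] else ks) []) (fun k => k) with
      | none => 0
      | some m => m) = b.1
  rw [PySem.List.foldl_append_if (fun q => M == q.2) (fun q => q.1) l []]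
  simp only [List.nil_append]
  have hbkeys : b.1 ∈ (l.filter (fun p => M == p.2)).map (fun p => p.1) :=
    List.mem_map_of_mem (List.mem_filter.2 ⟨hlcons ▸ hbmem, by simp [hbM]⟩)
  obtain ⟨m, hm⟩ : ∃ m, PySem.List.min? ((l.filter (fun p => M == p.2)).map (fun p => p.1)) (fun k => k) = some m := by
    cases h : PySem.List.min? ((l.filter (fun p => M == p.2)).map (fun p => p.1)) (fun k => k) with
    | none =>
      rw [PySem.List.min?_eq_none_iff] at h
      rw [h] at hbkeys
      cases hbkeys
    | some m => exact ⟨m, rfl⟩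
  rw [hm]
  show m = b.1
  -- m = b.1 by antisymmetry
  have hmle : m ≤ b.1 := by simpa using PySem.List.min?_isMin hm b.1 hbkeys
  have hmmem := PySem.List.min?_mem hm
  obtain ⟨q, hq, hq1⟩ := List.mem_map.1 hmmem
  have hqf := List.mem_filter.1 hq
  have hqM : q.2 = M := by have := hqf.2; simp at this; omega
  have hbleq : b.1 ≤ q.1 := hbmin q (hlcons ▸ hqf.1) (by omega)
  omega
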